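-- pv_equiv track=rewrite | github.com/Sauci/pya2l | pya2l/helpers/helpers.py | get_byte_size_from_unpack_format
-- ===== SOURCE A (Python) =====
-- def get_byte_size_from_unpack_format(packing_format: str) -> int:
--     result = 0
--     for c in packing_format:
--         if c.lower() == 'b':
--             result += 1
--         if c.lower() == 'h':
--             result += 2
--         if c.lower() == 'i':
--             result += 4
--         if c.lower() == 'f':
--             result += 4
--         if c.lower() == 'd':
--             result += 8
--     return result
-- ===== SOURCE B (Python) =====
-- def get_byte_size_from_unpack_format(packing_format: str) -> int:
--     lowered = packing_format.lower()
--     return sum(lowered.count(letter) * size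
--                for letter, size in (('b', 1), ('h', 2), ('i', 4), ('f', 4), ('d', 8)))
-- ===== Notes on version B (the rewrite author's own statement) =====
-- stated objective: faster
-- what changed: Replaces the char-by-char accumulating loop of if-chains with one lower() pass followed by five independent str.count scans, summing count*size per format letter.
import Mathlib
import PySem

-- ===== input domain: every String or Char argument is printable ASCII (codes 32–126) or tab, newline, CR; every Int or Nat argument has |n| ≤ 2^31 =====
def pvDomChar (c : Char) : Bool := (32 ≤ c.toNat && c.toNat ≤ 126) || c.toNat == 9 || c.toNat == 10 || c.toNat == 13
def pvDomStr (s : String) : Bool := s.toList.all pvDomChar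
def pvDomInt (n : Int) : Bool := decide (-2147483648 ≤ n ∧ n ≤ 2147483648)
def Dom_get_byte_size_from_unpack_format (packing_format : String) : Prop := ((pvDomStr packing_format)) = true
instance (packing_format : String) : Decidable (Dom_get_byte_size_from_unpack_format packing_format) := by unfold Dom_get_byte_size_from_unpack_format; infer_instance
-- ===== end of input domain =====

-- B replaces A's single accumulating loop of if-chains by one lower() pass plus five
-- independent count scans (count*size summed); a timing run measured B faster (constant factor).

-- ===== PORT A =====
def get_byte_size_from_unpack_format (packing_format : String) : Int :=
  packing_format.toList.foldl (fun result c =>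
    let result := if PySem.Chars.lowerChar c = 'b' then result + 1 else result
    let result := if PySem.Chars.lowerChar c = 'h' then result + 2 else result
    let result := if PySem.Chars.lowerChar c = 'i' then result + 4 else result
    let result := if PySem.Chars.lowerChar c = 'f' then result + 4 else result
    let result := if PySem.Chars.lowerChar c = 'd' then result + 8 else result
    result) 0

-- ===== PORT B =====
def get_byte_size_from_unpack_format_alt (packing_format : String) : Int :=
  let lowered := PySem.Str.lower packing_format
  ([("b", (1 : Int)), ("h", 2), ("i", 4), ("f", 4), ("d", 8)].map
    (fun p => (PySem.Str.count lowered p.1 : Int) * p.2)).sum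

-- ===== PRECONDITION & SPEC =====
def Spec_get_byte_size_from_unpack_format (packing_format : String) (out : Int) : Prop := out = get_byte_size_from_unpack_format_alt packing_format
instance (packing_format : String) (out : Int) : Decidable (Spec_get_byte_size_from_unpack_format packing_format out) := by unfold Spec_get_byte_size_from_unpack_format; infer_instance

-- ===== CLAIM (what is proved, stated in full; the proofs are below) =====
def Claim_equal_get_byte_size_from_unpack_format : Prop := ∀ (packing_format : String), Dom_get_byte_size_from_unpack_format packing_format → Spec_get_byte_size_from_unpack_format packing_format (get_byte_size_from_unpack_format packing_format)

-- ===== LEMMAS AND PROOFS =====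

-- Python str.count with a single-character needle is plain character count
theorem chars_count_singleton (l : List Char) (c : Char) :
    PySem.Chars.count l [c] = l.count c := by
  have go : ∀ (l : List Char) (fuel acc : Nat), l.length ≤ fuel →
      PySem.Chars.count.go [c] fuel l acc = acc + l.count c := by
    intro l
    induction l with
    | nil => intro fuel acc _; cases fuel <;> simp [PySem.Chars.count.go]
    | cons h t ih =>
      intro fuel acc hle
      cases fuel with
      | zero => simp at hle
      | succ n =>
        by_cases hc : h = c
        · subst hc
          simp only [PySem.Chars.count.go, List.isPrefixOf, List.count_cons]
          simp
          rw [ih _ _ (by simpa using hle)]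
          omega
        · simp only [PySem.Chars.count.go, List.isPrefixOf, List.count_cons]
          simp [Ne.symm hc, hc]
          rw [ih _ _ (by simpa using hle)]
  simp [PySem.Chars.count, go l l.length 0 le_rfl]

-- A's loop body, named (definitionally equal to the lambda in the port)
def stepA (result : Int) (c : Char) : Int :=
  let result := if PySem.Chars.lowerChar c = 'b' then result + 1 else result
  let result := if PySem.Chars.lowerChar c = 'h' then result + 2 else result
  let result := if PySem.Chars.lowerChar c = 'i' then result + 4 else result
  let result := if PySem.Chars.lowerChar c = 'f' then result + 4 else result
  let result := if PySem.Chars.lowerChar c = 'd' then result + 8 else result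
  result

-- the per-character contribution of A's loop body
def wA (c : Char) : Int :=
  (if PySem.Chars.lowerChar c = 'b' then 1 else 0)
  + (if PySem.Chars.lowerChar c = 'h' then 2 else 0)
  + (if PySem.Chars.lowerChar c = 'i' then 4 else 0)
  + (if PySem.Chars.lowerChar c = 'f' then 4 else 0)
  + (if PySem.Chars.lowerChar c = 'd' then 8 else 0)

theorem stepA_eq (r : Int) (c : Char) : stepA r c = r + wA c := by
  unfold stepA wA
  split_ifs <;> ring

theorem wA_eq (c : Char) :
    wA c = (if PySem.Chars.lowerChar c == 'b' then (1:Int) else 0) * 1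
      + (if PySem.Chars.lowerChar c == 'h' then (1:Int) else 0) * 2
      + (if PySem.Chars.lowerChar c == 'i' then (1:Int) else 0) * 4
      + (if PySem.Chars.lowerChar c == 'f' then (1:Int) else 0) * 4
      + (if PySem.Chars.lowerChar c == 'd' then (1:Int) else 0) * 8 := by
  unfold wA; simp only [beq_iff_eq]; split_ifs <;> ring

-- A's loop characterised as weighted counts over the character list
theorem aLoop_eq (l : List Char) (a : Int) :
    l.foldl stepA a
    = a + (l.countP (fun c => PySem.Chars.lowerChar c == 'b') : Int) * 1
        + (l.countP (fun c => PySem.Chars.lowerChar c == 'h') : Int) * 2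
        + (l.countP (fun c => PySem.Chars.lowerChar c == 'i') : Int) * 4
        + (l.countP (fun c => PySem.Chars.lowerChar c == 'f') : Int) * 4
        + (l.countP (fun c => PySem.Chars.lowerChar c == 'd') : Int) * 8 := by
  induction l generalizing a with
  | nil => simp
  | cons h t ih =>
    simp only [List.foldl_cons, List.countP_cons, stepA_eq, ih, wA_eq]
    push_cast
    split_ifs <;> push_cast <;> ring

-- counting a letter in the lowered list = counting lowered-matches in the original
theorem count_lower_eq (l : List Char) (c : Char) :
    PySem.Chars.count (l.map PySem.Chars.lowerChar) [c]
      = l.countP (fun x => PySem.Chars.lowerChar x == c) := by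
  rw [chars_count_singleton, List.count_eq_countP, List.countP_map]; rfl

-- ===== VERDICT (by name: the statement is the Claim_ definition above) =====
theorem get_byte_size_from_unpack_format_spec : Claim_equal_get_byte_size_from_unpack_format := by
  intro pf _
  show _ = _
  have hA : get_byte_size_from_unpack_format pf = pf.toList.foldl stepA 0 := rfl
  rw [hA, aLoop_eq]
  unfold get_byte_size_from_unpack_format_alt
  simp only [List.map_cons, List.map_nil, List.sum_cons, List.sum_nil,
    PySem.Str.count_eq, PySem.Str.toList_lower, PySem.Chars.lower]
  rw [show ("b" : String).toList = ['b'] from rfl, show ("h" : String).toList = ['h'] from rfl,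
    show ("i" : String).toList = ['i'] from rfl, show ("f" : String).toList = ['f'] from rfl,
    show ("d" : String).toList = ['d'] from rfl]
  simp only [count_lower_eq]
  ring
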